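-- pv_equiv track=rewrite | github.com/pypi-data/pypi-mirror-404 | packages/duckguard/duckguard-3.1.0.tar.gz/duckguard-3.1.0/src/duckguard/profiler/pattern_matcher.py | get_pattern_category
-- ===== SOURCE A (Python) =====
-- def get_pattern_category(pattern_type: str) -> str:
--     """
--     Get the category of a pattern type.
--
--     Args:
--         pattern_type: Pattern type name
--
--     Returns:
--         Category name
--     """
--     categories = {
--         'Contact': ['email', 'phone_us', 'phone_intl', 'url'],
--         'Identifier': ['uuid', 'ssn', 'credit_card'],
--         'Address': ['ip_address', 'ipv6_address', 'mac_address', 'zip_code_us', 'postal_code_ca'],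
--         'Financial': ['currency_usd', 'currency_eur', 'iban'],
--         'DateTime': ['date_iso', 'date_us', 'time_24h', 'timestamp_iso'],
--         'File': ['file_path_unix', 'file_path_windows'],
--         'Code': ['hex_color', 'base64'],
--         'Social': ['twitter_handle', 'hashtag'],
--     }
--
--     for category, types in categories.items():
--         if pattern_type in types:
--             return category
--
--     return 'Other'
-- ===== SOURCE B (Python) =====
-- _CATEGORY_BY_TYPE = {
--     'email': 'Contact', 'phone_us': 'Contact', 'phone_intl': 'Contact', 'url': 'Contact',
--     'uuid': 'Identifier', 'ssn': 'Identifier', 'credit_card': 'Identifier',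
--     'ip_address': 'Address', 'ipv6_address': 'Address', 'mac_address': 'Address',
--     'zip_code_us': 'Address', 'postal_code_ca': 'Address',
--     'currency_usd': 'Financial', 'currency_eur': 'Financial', 'iban': 'Financial',
--     'date_iso': 'DateTime', 'date_us': 'DateTime', 'time_24h': 'DateTime', 'timestamp_iso': 'DateTime',
--     'file_path_unix': 'File', 'file_path_windows': 'File',
--     'hex_color': 'Code', 'base64': 'Code',
--     'twitter_handle': 'Social', 'hashtag': 'Social',
-- }
--
-- def get_pattern_category(pattern_type: str) -> str:
--     return _CATEGORY_BY_TYPE.get(pattern_type, 'Other')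
-- ===== Notes on version B (the rewrite author's own statement) =====
-- stated objective: idiomatic
-- what changed: Inverted A's category-to-list-of-types table into a single flat type-to-category dictionary built once at module level, so the per-call loop over categories with inner membership scans is replaced by one direct dict lookup with the default fallback.
import Mathlib
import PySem

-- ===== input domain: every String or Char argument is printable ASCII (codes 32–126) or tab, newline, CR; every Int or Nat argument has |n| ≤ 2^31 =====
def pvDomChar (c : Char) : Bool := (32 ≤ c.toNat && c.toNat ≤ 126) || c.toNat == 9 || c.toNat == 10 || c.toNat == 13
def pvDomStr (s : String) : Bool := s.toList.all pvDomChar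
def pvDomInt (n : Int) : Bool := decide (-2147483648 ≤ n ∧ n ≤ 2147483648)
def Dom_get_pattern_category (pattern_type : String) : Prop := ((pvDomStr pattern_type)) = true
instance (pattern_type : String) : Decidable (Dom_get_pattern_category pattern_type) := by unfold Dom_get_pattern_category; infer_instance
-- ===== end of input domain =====

-- B replaces A's loop over a category→types table (membership scan per category) by a
-- single lookup in a flat type→category dictionary built once; objective: idiomatic.

-- ===== PORT A =====
-- the categories dict of A, in insertion order
def pvCategoriesA : List (String × List String) :=
  [("Contact", ["email", "phone_us", "phone_intl", "url"]),
   ("Identifier", ["uuid", "ssn", "credit_card"]),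
   ("Address", ["ip_address", "ipv6_address", "mac_address", "zip_code_us", "postal_code_ca"]),
   ("Financial", ["currency_usd", "currency_eur", "iban"]),
   ("DateTime", ["date_iso", "date_us", "time_24h", "timestamp_iso"]),
   ("File", ["file_path_unix", "file_path_windows"]),
   ("Code", ["hex_color", "base64"]),
   ("Social", ["twitter_handle", "hashtag"])]

-- the 'for category, types in categories.items(): if pattern_type in types: return category' loop
def pvLoopA (pattern_type : String) : List (String × List String) → String
  | [] => "Other"
  | (category, types) :: rest =>
      if types.contains pattern_type then category else pvLoopA pattern_type rest

def get_pattern_category (pattern_type : String) : String :=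
  pvLoopA pattern_type pvCategoriesA

-- ===== PORT B =====
-- flat type→category dictionary (module-level _CATEGORY_BY_TYPE in Source B)
def pvCategoryByType : PySem.Dict String String :=
  PySem.Dict.ofList
  [("email", "Contact"),
   ("phone_us", "Contact"),
   ("phone_intl", "Contact"),
   ("url", "Contact"),
   ("uuid", "Identifier"),
   ("ssn", "Identifier"),
   ("credit_card", "Identifier"),
   ("ip_address", "Address"),
   ("ipv6_address", "Address"),
   ("mac_address", "Address"),
   ("zip_code_us", "Address"),
   ("postal_code_ca", "Address"),
   ("currency_usd", "Financial"),
   ("currency_eur", "Financial"),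
   ("iban", "Financial"),
   ("date_iso", "DateTime"),
   ("date_us", "DateTime"),
   ("time_24h", "DateTime"),
   ("timestamp_iso", "DateTime"),
   ("file_path_unix", "File"),
   ("file_path_windows", "File"),
   ("hex_color", "Code"),
   ("base64", "Code"),
   ("twitter_handle", "Social"),
   ("hashtag", "Social")]

def get_pattern_category_alt (pattern_type : String) : String :=
  PySem.Dict.getD pvCategoryByType pattern_type "Other"

-- ===== PRECONDITION & SPEC =====
def Spec_get_pattern_category (pattern_type : String) (out : String) : Prop := out = get_pattern_category_alt pattern_type
instance (pattern_type : String) (out : String) : Decidable (Spec_get_pattern_category pattern_type out) := by unfold Spec_get_pattern_category; infer_instance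

-- ===== CLAIM (what is proved, stated in full; the proofs are below) =====
def Claim_equal_get_pattern_category : Prop := ∀ (pattern_type : String), Dom_get_pattern_category pattern_type → Spec_get_pattern_category pattern_type (get_pattern_category pattern_type)

-- ===== LEMMAS AND PROOFS =====
theorem pv_items :
    pvCategoryByType.items =
      [("email", "Contact"), ("phone_us", "Contact"), ("phone_intl", "Contact"), ("url", "Contact"),
       ("uuid", "Identifier"), ("ssn", "Identifier"), ("credit_card", "Identifier"),
       ("ip_address", "Address"), ("ipv6_address", "Address"), ("mac_address", "Address"),
       ("zip_code_us", "Address"), ("postal_code_ca", "Address"), ("currency_usd", "Financial"),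
       ("currency_eur", "Financial"), ("iban", "Financial"), ("date_iso", "DateTime"),
       ("date_us", "DateTime"), ("time_24h", "DateTime"), ("timestamp_iso", "DateTime"),
       ("file_path_unix", "File"), ("file_path_windows", "File"), ("hex_color", "Code"),
       ("base64", "Code"), ("twitter_handle", "Social"), ("hashtag", "Social")] := by
  decide

theorem pv_eq (pattern_type : String) :
    get_pattern_category pattern_type = get_pattern_category_alt pattern_type := by
  by_cases h : pattern_type ∈ ["email", "phone_us", "phone_intl", "url", "uuid", "ssn", "credit_card", "ip_address", "ipv6_address", "mac_address", "zip_code_us", "postal_code_ca", "currency_usd", "currency_eur", "iban", "date_iso", "date_us", "time_24h", "timestamp_iso", "file_path_unix", "file_path_windows", "hex_color", "base64", "twitter_handle", "hashtag"]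
  · fin_cases h <;> rfl
  · simp only [List.mem_cons, List.not_mem_nil, not_or, or_false] at h
    obtain ⟨h01, h02, h03, h04, h05, h06, h07, h08, h09, h10, h11, h12, h13, h14, h15,
      h16, h17, h18, h19, h20, h21, h22, h23, h24, h25⟩ := h
    simp only [get_pattern_category, get_pattern_category_alt, pvCategoriesA, pvLoopA,
      PySem.Dict.getD, PySem.Dict.get?, pv_items, List.contains, List.elem_cons,
      List.elem_nil, List.find?,
      beq_eq_false_iff_ne.mpr h01, beq_eq_false_iff_ne.mpr h02, beq_eq_false_iff_ne.mpr h03, beq_eq_false_iff_ne.mpr h04, beq_eq_false_iff_ne.mpr h05, beq_eq_false_iff_ne.mpr h06, beq_eq_false_iff_ne.mpr h07, beq_eq_false_iff_ne.mpr h08, beq_eq_false_iff_ne.mpr h09, beq_eq_false_iff_ne.mpr h10, beq_eq_false_iff_ne.mpr h11, beq_eq_false_iff_ne.mpr h12, beq_eq_false_iff_ne.mpr h13, beq_eq_false_iff_ne.mpr h14, beq_eq_false_iff_ne.mpr h15, beq_eq_false_iff_ne.mpr h16, beq_eq_false_iff_ne.mpr h17, beq_eq_false_iff_ne.mpr h18,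 beq_eq_false_iff_ne.mpr h19, beq_eq_false_iff_ne.mpr h20, beq_eq_false_iff_ne.mpr h21, beq_eq_false_iff_ne.mpr h22, beq_eq_false_iff_ne.mpr h23, beq_eq_false_iff_ne.mpr h24, beq_eq_false_iff_ne.mpr h25,
      beq_eq_false_iff_ne.mpr (Ne.symm h01), beq_eq_false_iff_ne.mpr (Ne.symm h02), beq_eq_false_iff_ne.mpr (Ne.symm h03), beq_eq_false_iff_ne.mpr (Ne.symm h04), beq_eq_false_iff_ne.mpr (Ne.symm h05), beq_eq_false_iff_ne.mpr (Ne.symm h06), beq_eq_false_iff_ne.mpr (Ne.symm h07), beq_eq_false_iff_ne.mpr (Ne.symm h08), beq_eq_false_iff_ne.mpr (Ne.symm h09), beq_eq_false_iff_ne.mpr (Ne.symm h10), beq_eq_false_iff_ne.mpr (Ne.symm h11), beq_eq_false_iff_ne.mpr (Ne.symm h12), beq_eq_false_iff_ne.mpr (Ne.symm h13), beq_eq_false_iff_ne.mpr (Ne.symm h14), beq_eq_false_iff_ne.mpr (Ne.symm h15), beq_eq_false_iff_ne.mpr (Ne.symm h16), beq_eq_false_iff_ne.mpr (Ne.symm h17),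 beq_eq_false_iff_ne.mpr (Ne.symm h18), beq_eq_false_iff_ne.mpr (Ne.symm h19), beq_eq_false_iff_ne.mpr (Ne.symm h20), beq_eq_false_iff_ne.mpr (Ne.symm h21), beq_eq_false_iff_ne.mpr (Ne.symm h22), beq_eq_false_iff_ne.mpr (Ne.symm h23), beq_eq_false_iff_ne.mpr (Ne.symm h24), beq_eq_false_iff_ne.mpr (Ne.symm h25)]
    rfl

-- ===== VERDICT (by name: the statement is the Claim_ definition above) =====
theorem get_pattern_category_spec : Claim_equal_get_pattern_category := by
  intro pattern_type _
  unfold Spec_get_pattern_category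
  exact pv_eq pattern_type
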